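-- pv_equiv track=rewrite | github.com/git874997967/LeetCode_Python | easy/leetCode1933.py | isDecomposable
-- ===== SOURCE A (Python) =====
-- def isDecomposable(s):
--      i,n ,two = 0,len(s),False
--      if n % 3 != 2: return False
--      while i < n:
--          if i < n - 2 and s[i] == s[i+1] == s[i+2]:
--              i+= 3
--          elif s[i] == s[i+1] and not two:
--              two = True
--              i += 2
--          else:
--              return False
--
--      return True
-- ===== SOURCE B (Python) =====
-- def isDecomposable(s):
--     runs, prev, cnt = [], None, 0
--     for ch in s:
--         if ch == prev:
--             cnt += 1
--         else:
--             if cnt: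
--                 runs.append(cnt)
--             prev, cnt = ch, 1
--     if cnt:
--         runs.append(cnt)
--     return all(r % 3 != 1 for r in runs) and sum(1 for r in runs if r % 3 == 2) == 1
-- ===== Notes on version B (the rewrite author's own statement) =====
-- stated objective: simpler
-- what changed: Replaces A's greedy index-pointer loop (consuming triples/one pair with a flag and early returns) by a run-length-encoding pass followed by a direct remainder test: no run length is 1 mod 3 and exactly one run length is 2 mod 3.
import Mathlib
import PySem

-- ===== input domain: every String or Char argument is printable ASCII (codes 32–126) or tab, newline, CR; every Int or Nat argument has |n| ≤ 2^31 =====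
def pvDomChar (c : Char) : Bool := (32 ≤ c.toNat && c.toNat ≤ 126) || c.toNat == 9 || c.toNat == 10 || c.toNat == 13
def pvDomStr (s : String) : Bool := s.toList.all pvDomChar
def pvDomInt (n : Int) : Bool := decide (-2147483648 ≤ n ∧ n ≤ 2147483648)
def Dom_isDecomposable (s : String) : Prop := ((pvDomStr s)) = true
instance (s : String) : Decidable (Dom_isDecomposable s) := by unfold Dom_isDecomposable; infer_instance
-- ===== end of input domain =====

-- B replaces A's greedy index-pointer loop by a run-length encoding pass plus a
-- remainder test on the run lengths (objective: simpler/alternative; same cost).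


-- ===== PORT A =====
-- A's while-loop. Option-valued pyGet? comparisons: `none` is exactly where Python would
-- raise IndexError; that elif access s[i+1] with i+1 = n is unreachable in A's real runs
-- (the loop is only entered when n % 3 == 2), so A never raises and no Pre_ is needed.
-- fuel = a totality guard only: each iteration needs i < n and moves i forward,
-- so cs.length + 1 units of fuel are never exhausted (proved in loopA_eq_fA below).
def isDecomposableLoopA (cs : List Char) (n : Int) : Nat → Int → Bool → Bool
  | 0, _, _ => true
  | fuel + 1, i, two =>
    if i < n then
      if i < n - 2 ∧ PySem.List.pyGet? cs i = PySem.List.pyGet? cs (i + 1)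
          ∧ PySem.List.pyGet? cs (i + 1) = PySem.List.pyGet? cs (i + 2) then
        isDecomposableLoopA cs n fuel (i + 3) two
      else if PySem.List.pyGet? cs i = PySem.List.pyGet? cs (i + 1) ∧ two = false then
        isDecomposableLoopA cs n fuel (i + 2) true
      else false
    else true

def isDecomposable (s : String) : Bool :=
  let cs := s.toList
  let n : Int := cs.length
  if PySem.Int.mod n 3 ≠ 2 then false
  else isDecomposableLoopA cs n (cs.length + 1) 0 false

-- ===== PORT B =====
-- Source B's for-loop over characters with state (runs, prev, cnt), then the remainder test.
def isDecomposableStepB (st : List Nat × Option Char × Nat) (ch : Char) :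
    List Nat × Option Char × Nat :=
  match st with
  | (runs, prev, cnt) =>
    if some ch = prev then (runs, prev, cnt + 1)
    else if cnt ≠ 0 then (runs ++ [cnt], some ch, 1)
    else (runs, some ch, 1)

def isDecomposable_alt (s : String) : Bool :=
  let st := s.toList.foldl isDecomposableStepB ([], none, 0)
  let runs := if st.2.2 ≠ 0 then st.1 ++ [st.2.2] else st.1
  (runs.all (fun r => r % 3 != 1)) && (runs.countP (fun r => r % 3 == 2) == 1)

-- ===== PRECONDITION & SPEC =====
def Spec_isDecomposable (s : String) (out : Bool) : Prop := out = isDecomposable_alt s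
instance (s : String) (out : Bool) : Decidable (Spec_isDecomposable s out) := by
  unfold Spec_isDecomposable; infer_instance

-- ===== CLAIM (what is proved, stated in full; the proofs are below) =====
def Claim_equal_isDecomposable : Prop :=
  ∀ (s : String), Dom_isDecomposable s → Spec_isDecomposable s (isDecomposable s)

-- ===== LEMMAS AND PROOFS =====

-- run-length encoding, structurally (proof-side device)
def runsCont (a : Char) (c : Nat) : List Char → List Nat
  | [] => [c]
  | b :: t => if b = a then runsCont a (c + 1) t else c :: runsCont b 1 t

def runsOf : List Char → List Nat
  | [] => []
  | a :: t => runsCont a 1 t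

-- structural restatement of A's loop on the remaining suffix
def fA (u : List Char) (two : Bool) : Bool :=
  if u.isEmpty then true
  else if 3 ≤ u.length ∧ u[0]? = u[1]? ∧ u[1]? = u[2]? then fA (u.drop 3) two
  else if u[0]? = u[1]? ∧ two = false then fA (u.drop 2) true
  else false
termination_by u.length
decreasing_by
  · simp_all; omega
  · rcases u with _ | ⟨a, u⟩ <;> simp_all

-- "the run lengths admit a decomposition with at most b pairs left"
def good (rs : List Nat) (b : Nat) : Prop :=
  (∀ r ∈ rs, r % 3 ≠ 1) ∧ rs.countP (fun r => r % 3 == 2) ≤ b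

lemma runsCont_add (t : List Char) (a : Char) (c k : Nat) :
    runsCont a (c + k) t = ((runsCont a c t).headI + k) :: (runsCont a c t).tail := by
  induction t generalizing c with
  | nil => simp [runsCont]
  | cons b t ih =>
    by_cases hb : b = a
    · subst hb
      simp only [runsCont, if_true]
      rw [show c + k + 1 = (c + 1) + k by omega, ih]
    · simp [runsCont, hb]

lemma runsCont_sum (t : List Char) (a : Char) (c : Nat) :
    (runsCont a c t).sum = c + t.length := by
  induction t generalizing a c with
  | nil => simp [runsCont]
  | cons b t ih =>
    by_cases hb : b = a <;> simp [runsCont, hb, ih] <;> omega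

lemma runsOf_sum (u : List Char) : (runsOf u).sum = u.length := by
  cases u with
  | nil => simp [runsOf]
  | cons a t => simp [runsOf, runsCont_sum]; omega

lemma sum_mod_three (rs : List Nat) (h : ∀ r ∈ rs, r % 3 ≠ 1) :
    rs.sum % 3 = (2 * rs.countP (fun r => r % 3 == 2)) % 3 := by
  induction rs with
  | nil => simp
  | cons r rs ih =>
    have hr : r % 3 ≠ 1 := h r (by simp)
    have ih' := ih (fun x hx => h x (by simp [hx]))
    by_cases h2 : r % 3 = 2 <;> simp [h2, List.sum_cons] <;> omega

lemma good_cons_congr (r r' : Nat) (h : r % 3 = r' % 3) (rs : List Nat) (b : Nat) :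
    good (r :: rs) b ↔ good (r' :: rs) b := by
  simp [good, List.countP_cons, h]

lemma good_runsCont3 (t : List Char) (a : Char) (b : Nat) :
    good (runsCont a 3 t) b ↔ good (runsOf t) b := by
  cases t with
  | nil => simp [runsCont, runsOf, good]
  | cons d t2 =>
    by_cases hd : d = a
    · subst hd
      simp only [runsCont, if_true, runsOf]
      rw [show (3 + 1 : Nat) = 1 + 3 by omega, runsCont_add]
      rcases hne : runsCont d 1 t2 with _ | ⟨r, rs⟩
      · have := runsCont_sum t2 d 1
        rw [hne] at this; simp at this; omega
      · simp only [List.headI, List.tail]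
        exact good_cons_congr (r + 3) r (by omega) rs b
    · simp only [runsCont, if_neg hd, runsOf, good, List.countP_cons]
      constructor <;> rintro ⟨h1, h2⟩ <;> refine ⟨?_, ?_⟩
      · exact fun x hx => h1 x (List.mem_cons_of_mem _ hx)
      · simpa using h2
      · intro x hx
        rcases List.mem_cons.mp hx with h | h
        · omega
        · exact h1 x h
      · simpa using h2

lemma good_one_head (r : Nat) (h : r % 3 = 1) (rs : List Nat) (b : Nat) :
    ¬ good (r :: rs) b := by
  rintro ⟨h1, -⟩
  exact h1 r (List.mem_cons_self) h

lemma good_two_cons (rs : List Nat) :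
    (good (2 :: rs) 1 ↔ good rs 0) ∧ ¬ good (2 :: rs) 0 := by
  constructor
  · simp [good, List.countP_cons]
  · rintro ⟨-, h2⟩
    simp at h2

lemma fA_nil (two : Bool) : fA [] two = true := by
  rw [fA]; simp

lemma fA_one (a : Char) (two : Bool) : fA [a] two = false := by
  rw [fA]; simp

lemma fA_two (a b : Char) (two : Bool) : fA [a, b] two = (decide (a = b) && !two) := by
  rw [fA]
  by_cases hab : a = b <;> rcases two with _ | _ <;> simp [hab, fA_nil]

lemma fA_cons3 (a b c : Char) (t : List Char) (two : Bool) :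
    fA (a :: b :: c :: t) two =
      if a = b ∧ b = c then fA t two
      else if a = b ∧ two = false then fA (c :: t) true else false := by
  rw [fA]
  have h3 : 3 ≤ (a :: b :: c :: t).length := by simp
  simp only [List.isEmpty_cons, Bool.false_eq_true, if_false, h3,
    List.getElem?_cons_zero, List.getElem?_cons_succ, Option.some.injEq,
    List.drop_succ_cons, List.drop_zero, true_and]

lemma runsOf_cons3 (a : Char) (t : List Char) :
    runsOf (a :: a :: a :: t) = runsCont a 3 t := by
  simp [runsOf, runsCont, show (1 + 1 + 1 : Nat) = 3 by omega]

lemma runsOf_cons2 (a c : Char) (t : List Char) (hca : c ≠ a) :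
    runsOf (a :: a :: c :: t) = 2 :: runsOf (c :: t) := by
  simp [runsOf, runsCont, hca, show (1 + 1 : Nat) = 2 by omega]

lemma fA_good : ∀ (n : Nat) (u : List Char), u.length = n → ∀ (two : Bool),
    fA u two = true ↔ good (runsOf u) (if two then 0 else 1) := by
  intro n
  induction n using Nat.strong_induction_on with
  | _ n ih =>
    intro u hlen two
    match u with
    | [] =>
      rw [fA_nil]; simp [runsOf, good]
    | [a] =>
      rw [fA_one]; simp [runsOf, runsCont, good]
    | [a, b] =>
      rw [fA_two]
      by_cases hab : a = b
      · subst hab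
        rcases two with _ | _ <;>
          simp [runsOf, runsCont, good]
      · have hba : ¬ b = a := fun h => hab (h.symm)
        simp only [runsOf, runsCont, if_neg hba, good]
        simp [hab]
    | a :: b :: c :: t =>
      subst hlen
      rw [fA_cons3]
      by_cases h1 : a = b ∧ b = c
      · obtain ⟨hab, hbc⟩ := h1
        subst hab; subst hbc
        rw [if_pos ⟨rfl, rfl⟩, runsOf_cons3,
          ih t.length (by simp; omega) t rfl two]
        exact (good_runsCont3 t a _).symm
      · rw [if_neg h1]
        by_cases hab : a = b
        · subst hab
          have hca : c ≠ a := fun h => h1 ⟨rfl, h.symm⟩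
          rw [runsOf_cons2 a c t hca]
          rcases two with _ | _
          · rw [if_pos ⟨rfl, rfl⟩,
              ih (c :: t).length (by simp) (c :: t) rfl true]
            simpa using ((good_two_cons (runsOf (c :: t))).1).symm
          · rw [if_neg (by simp)]
            simpa using fun h => (good_two_cons (runsOf (c :: t))).2 h
        · rw [if_neg (by rintro ⟨h, -⟩; exact hab h)]
          have hba : ¬ b = a := fun h => hab (h.symm)
          have hruns : runsOf (a :: b :: c :: t) = 1 :: runsCont b 1 (c :: t) := by
            simp [runsOf, runsCont, hba]
          rw [hruns]
          simpa using fun h => good_one_head 1 rfl _ _ h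

lemma loopA_eq_fA (cs : List Char) : ∀ (fuel : Nat) (i : Int) (two : Bool), 0 ≤ i →
    cs.length - i.toNat < fuel →
    isDecomposableLoopA cs (cs.length : Int) fuel i two = fA (cs.drop i.toNat) two := by
  intro fuel
  induction fuel with
  | zero => intro i two hi hk; omega
  | succ fuel ih =>
    intro i two hi hk
    rw [isDecomposableLoopA]
    by_cases hlt : i < (cs.length : Int)
    · have hm : i.toNat < cs.length := by omega
      rw [if_pos hlt]
      have hg0 : PySem.List.pyGet? cs i = (cs.drop i.toNat)[0]? := by
        rw [PySem.List.pyGet?_of_nonneg cs hi, List.getElem?_drop]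
        simp
      have hg1 : PySem.List.pyGet? cs (i + 1) = (cs.drop i.toNat)[1]? := by
        rw [PySem.List.pyGet?_of_nonneg cs (by omega : (0:Int) ≤ i + 1),
          show (i + 1).toNat = i.toNat + 1 by omega, List.getElem?_drop]
      have hg2 : PySem.List.pyGet? cs (i + 2) = (cs.drop i.toNat)[2]? := by
        rw [PySem.List.pyGet?_of_nonneg cs (by omega : (0:Int) ≤ i + 2),
          show (i + 2).toNat = i.toNat + 2 by omega, List.getElem?_drop]
      have hlen : (cs.drop i.toNat).length = cs.length - i.toNat := List.length_drop
      have hne : ¬ ((cs.drop i.toNat).isEmpty = true) := by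
        simp [hlen]; omega
      have hcond : (i < (cs.length : Int) - 2) ↔ 3 ≤ (cs.drop i.toNat).length := by
        rw [hlen]; omega
      rw [hg0, hg1, hg2]
      rw [fA, if_neg hne]
      by_cases h1 : i < (cs.length : Int) - 2 ∧
          (cs.drop i.toNat)[0]? = (cs.drop i.toNat)[1]? ∧
          (cs.drop i.toNat)[1]? = (cs.drop i.toNat)[2]?
      · rw [if_pos h1, if_pos ⟨hcond.mp h1.1, h1.2⟩]
        rw [ih (i + 3) two (by omega) (by omega)]
        congr 1
        rw [show (i + 3).toNat = i.toNat + 3 by omega, List.drop_drop]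
      · rw [if_neg h1,
          if_neg (show ¬(3 ≤ (cs.drop i.toNat).length ∧
              (cs.drop i.toNat)[0]? = (cs.drop i.toNat)[1]? ∧
              (cs.drop i.toNat)[1]? = (cs.drop i.toNat)[2]?) from
            by rintro ⟨h3, ha, hb⟩; exact h1 ⟨hcond.mpr h3, ha, hb⟩)]
        by_cases h2 : (cs.drop i.toNat)[0]? = (cs.drop i.toNat)[1]? ∧ two = false
        · rw [if_pos h2]
          have hlt2 : i.toNat + 1 < cs.length := by
            by_contra hge
            have hnone : (cs.drop i.toNat)[1]? = none := by
              rw [List.getElem?_eq_none_iff, hlen]; omega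
            have h0some : (cs.drop i.toNat)[0]? = some cs[i.toNat] := by
              rw [List.getElem?_drop]
              simpa using List.getElem?_eq_getElem hm
            rw [hnone, h0some] at h2
            exact Option.some_ne_none _ h2.1
          rw [ih (i + 2) true (by omega) (by omega)]
          congr 1
          rw [show (i + 2).toNat = i.toNat + 2 by omega, List.drop_drop]
          rw [if_pos h2]
        · rw [if_neg h2, if_neg h2]
    · rw [if_neg hlt, fA]
      have hnil : cs.drop i.toNat = [] := by
        rw [List.drop_eq_nil_iff]; omega
      rw [hnil]
      simp

lemma foldB (t : List Char) : ∀ (rs : List Nat) (a : Char) (c : Nat), c ≠ 0 →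
    (if (t.foldl isDecomposableStepB (rs, some a, c)).2.2 ≠ 0 then
        (t.foldl isDecomposableStepB (rs, some a, c)).1 ++
          [(t.foldl isDecomposableStepB (rs, some a, c)).2.2]
      else (t.foldl isDecomposableStepB (rs, some a, c)).1) = rs ++ runsCont a c t := by
  induction t with
  | nil => intro rs a c hc; simp [runsCont, hc]
  | cons b t ih =>
    intro rs a c hc
    simp only [List.foldl_cons]
    by_cases hb : b = a
    · rw [show isDecomposableStepB (rs, some a, c) b = (rs, some a, c + 1) by
        simp [isDecomposableStepB, hb]]
      rw [ih rs a (c + 1) (by omega)]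
      simp [runsCont, hb]
    · rw [show isDecomposableStepB (rs, some a, c) b = (rs ++ [c], some b, 1) by
        simp [isDecomposableStepB, hb, hc]]
      rw [ih (rs ++ [c]) b 1 (by omega)]
      simp [runsCont, hb]

lemma alt_eq_chk (s : String) :
    isDecomposable_alt s = true ↔
      ((∀ r ∈ runsOf s.toList, r % 3 ≠ 1) ∧
        (runsOf s.toList).countP (fun r => r % 3 == 2) = 1) := by
  rcases hcs : s.toList with _ | ⟨a, t⟩
  · simp [isDecomposable_alt, hcs, runsOf]
  · simp only [isDecomposable_alt, hcs, List.foldl_cons]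
    rw [show isDecomposableStepB ([], none, 0) a = ([], some a, 1) by
      simp [isDecomposableStepB]]
    rw [foldB t [] a 1 (by omega)]
    simp [runsOf]

-- ===== VERDICT (by name: the statement is the Claim_ definition above) =====
theorem isDecomposable_spec : Claim_equal_isDecomposable := by
  intro s _
  unfold Spec_isDecomposable
  rw [Bool.eq_iff_iff]
  have hmod : PySem.Int.mod (s.toList.length : Int) 3 = ((s.toList.length % 3 : Nat) : Int) := by
    exact_mod_cast PySem.Int.mod_natCast s.toList.length 3
  have hA : isDecomposable s = true ↔
      (s.toList.length % 3 = 2 ∧ good (runsOf s.toList) 1) := by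
    unfold isDecomposable
    dsimp only
    rw [hmod, loopA_eq_fA s.toList (s.toList.length + 1) 0 false (by omega) (by omega)]
    simp only [Int.toNat_zero, List.drop_zero]
    by_cases h : s.toList.length % 3 = 2
    · rw [if_neg (by omega)]
      rw [fA_good s.toList.length s.toList rfl false]
      simp only [Bool.false_eq_true, if_false]
      exact ⟨fun hg => ⟨h, hg⟩, fun hg => hg.2⟩
    · rw [if_pos (by omega)]
      exact iff_of_false (by simp) (fun hg => h hg.1)
  rw [hA, alt_eq_chk s]
  have hsum := runsOf_sum s.toList
  constructor
  · rintro ⟨hlen, hall, hle⟩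
    refine ⟨hall, ?_⟩
    have h3 := sum_mod_three (runsOf s.toList) hall
    rw [hsum] at h3
    omega
  · rintro ⟨hall, hcnt⟩
    have h3 := sum_mod_three (runsOf s.toList) hall
    rw [hsum] at h3
    exact ⟨by omega, hall, by omega⟩
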